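-- pv_equiv track=rewrite | github.com/GiacomoPauletti/Benchmarking-AI-Factories | services/server/src/service_orchestration/core/slurm_client.py | _expand_slurm_hostlist
-- ===== SOURCE A (Python) =====
-- from typing import Dict, Any, Optional, List
--
-- def _split_top_level_csv(value: str) -> List[str]:
--     """Split a SLURM hostlist string on commas, ignoring commas inside brackets."""
--     parts: List[str] = []
--     buf: List[str] = []
--     depth = 0
--     for ch in value:
--         if ch == '[':
--             depth += 1
--         elif ch == ']':
--             depth = max(0, depth - 1)
--         if ch == ',' and depth == 0:
--             part = ''.join(buf).strip()
--             if part: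
--                 parts.append(part)
--             buf = []
--             continue
--         buf.append(ch)
--     tail = ''.join(buf).strip()
--     if tail:
--         parts.append(tail)
--     return parts
--
-- def _expand_slurm_hostlist(value: str) -> List[str]:
--     """Expand SLURM hostlist syntax into a list of hostnames.
--
--     Examples:
--       - "mel2074" -> ["mel2074"]
--       - "mel2074,mel2075" -> ["mel2074", "mel2075"]
--       - "mel[2074-2075]" -> ["mel2074", "mel2075"]
--       - "mel[0001-0003]" -> ["mel0001", "mel0002", "mel0003"]
--       - "mel[2074-2075],mel2080" -> ["mel2074", "mel2075", "mel2080"]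
--     """
--     value = (value or "").strip()
--     if not value:
--         return []
--
--     def expand_token(token: str) -> List[str]:
--         token = token.strip()
--         if not token:
--             return []
--
--         if '[' not in token:
--             return [token]
--
--         # Expand the first bracket expression, then recurse (supports multiple bracket groups).
--         start = token.find('[')
--         end = token.find(']', start + 1)
--         if end == -1:
--             return [token]  # malformed; return as-is
--
--         prefix = token[:start]
--         inside = token[start + 1:end]
--         suffix = token[end + 1:]
--
--         expanded: List[str] = []
--         for part in inside.split(','):
--             part = part.strip()
--             if not part:
--                 continue
--             if '-' in part:
--                 a, b = part.split('-', 1)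
--                 a = a.strip()
--                 b = b.strip()
--                 if not a or not b:
--                     continue
--                 width = max(len(a), len(b))
--                 try:
--                     start_num = int(a)
--                     end_num = int(b)
--                 except ValueError:
--                     continue
--                 step = 1 if end_num >= start_num else -1
--                 for n in range(start_num, end_num + step, step):
--                     expanded.extend(expand_token(f"{prefix}{n:0{width}d}{suffix}"))
--             else:
--                 expanded.extend(expand_token(f"{prefix}{part}{suffix}"))
--
--         return expanded
--
--     results: List[str] = []
--     for tok in _split_top_level_csv(value):
--         results.extend(expand_token(tok))
--     return [r for r in results if r]
-- ===== SOURCE B (Python) =====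
-- def _split_tokens(s):
--     """Top-level comma split (commas inside brackets ignored), by slice indices."""
--     parts = []
--     start = 0
--     depth = 0
--     for k, ch in enumerate(s):
--         if ch == '[':
--             depth += 1
--         elif ch == ']':
--             depth = max(0, depth - 1)
--         elif ch == ',' and depth == 0:
--             piece = s[start:k].strip()
--             if piece:
--                 parts.append(piece)
--             start = k + 1
--     piece = s[start:].strip()
--     if piece:
--         parts.append(piece)
--     return parts
--
--
-- def _expand_slurm_hostlist(value):
--     """Expand SLURM hostlist syntax into a list of hostnames (iterative worklist)."""
--     value = (value or "").strip()
--     if not value: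
--         return []
--     hosts = []
--     stack = _split_tokens(value)[::-1]
--     while stack:
--         token = stack.pop().strip()
--         if not token:
--             continue
--         i = token.find('[')
--         j = token.find(']', i + 1) if i >= 0 else -1
--         if i < 0 or j < 0:
--             hosts.append(token)
--             continue
--         head, body, tail = token[:i], token[i + 1:j], token[j + 1:]
--         fills = []
--         for part in body.split(','):
--             part = part.strip()
--             if not part:
--                 continue
--             if '-' not in part:
--                 fills.append(part)
--                 continue
--             lo, hi = part.split('-', 1)
--             lo, hi = lo.strip(), hi.strip()
--             if not lo or not hi:
--                 continue
--             try:
--                 a, b = int(lo), int(hi)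
--             except ValueError:
--                 continue
--             w = max(len(lo), len(hi))
--             step = 1 if b >= a else -1
--             fills.extend(str(n).zfill(w) for n in range(a, b + step, step))
--         stack.extend(head + f + tail for f in reversed(fills))
--     return hosts
-- ===== Notes on version B (the rewrite author's own statement) =====
-- stated objective: alternative
-- what changed: A's recursive expand_token (recursing on each substituted token inside the parsing loop) is replaced by an iterative worklist: one loop pops a token, either emits it or computes the bracket group's fill strings as a list and pushes the spliced children back on the stack; the top-level splitter tracks slice indices over enumerate(s) instead of accumulating a character buffer, and the final truthiness filter disappears because only nonempty tokens are ever emitted.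
import Mathlib
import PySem

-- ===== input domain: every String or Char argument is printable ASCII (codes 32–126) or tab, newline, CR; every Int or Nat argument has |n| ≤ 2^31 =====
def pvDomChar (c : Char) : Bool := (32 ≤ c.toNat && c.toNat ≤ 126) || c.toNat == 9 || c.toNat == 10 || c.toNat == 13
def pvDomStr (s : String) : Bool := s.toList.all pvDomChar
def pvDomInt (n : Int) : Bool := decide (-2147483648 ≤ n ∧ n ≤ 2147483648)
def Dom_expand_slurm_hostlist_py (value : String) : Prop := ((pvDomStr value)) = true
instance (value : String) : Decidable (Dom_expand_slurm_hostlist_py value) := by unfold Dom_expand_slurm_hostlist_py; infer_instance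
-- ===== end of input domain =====

-- B replaces A's recursive token expansion by an iterative worklist loop (and an
-- index-slice top-level splitter); objective: alternative structure, same cost.

-- ===== PORT A =====
-- _split_top_level_csv: fold over the characters with state (parts, buf, depth)
def splitStepA (st : List (List Char) × List Char × Int) (ch : Char) :
    List (List Char) × List Char × Int :=
  let parts := st.1
  let buf := st.2.1
  let depth := st.2.2
  let depth' := if ch = '[' then depth + 1 else if ch = ']' then max 0 (depth - 1) else depth
  if ch = ',' ∧ depth' = 0 then
    let part := PySem.Chars.strip buf
    ((if part = [] then parts else parts ++ [part]), ([] : List Char), depth')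
  else (parts, buf ++ [ch], depth')

def splitTopA (v : List Char) : List (List Char) :=
  let st := v.foldl splitStepA ([], [], 0)
  let tail := PySem.Chars.strip st.2.1
  if tail = [] then st.1 else st.1 ++ [tail]

-- f"{n:0{w}d}" : zero-padding keeps the sign in front — exactly str(n).zfill(w)
def padFmtA (n : Int) (w : Int) : List Char :=
  PySem.Chars.zfill (PySem.Int.toStr n).toList w

-- expand_token; the Nat argument is a fuel guard only (the recursion always
-- shortens the token, so fuel value.length+1 is never exhausted)
def expandTokenA : Nat → List Char → List (List Char)
  | 0, tok =>
    -- fuel-exhausted twin of the body: no recursion is possible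
    let token := PySem.Chars.strip tok
    if token = [] then []
    else if PySem.Chars.isIn ['['] token = false then [token]
    else
      let s := PySem.Chars.find token ['[']
      let e := PySem.Chars.findFrom token [']'] (s + 1)
      if e = -1 then [token] else []
  | f + 1, tok =>
    let token := PySem.Chars.strip tok
    if token = [] then []
    else if PySem.Chars.isIn ['['] token = false then [token]
    else
      let s := PySem.Chars.find token ['[']
      let e := PySem.Chars.findFrom token [']'] (s + 1)
      if e = -1 then [token]  -- malformed; return as-is
      else
        let pre := PySem.List.slice token none (some s)
        let inside := PySem.List.slice token (some (s + 1)) (some e)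
        let suf := PySem.List.slice token (some (e + 1)) none
        (PySem.Chars.splitOn inside [',']).foldl (fun expanded part0 =>
          let part := PySem.Chars.strip part0
          if part = [] then expanded
          else if PySem.Chars.isIn ['-'] part then
            match PySem.Chars.splitOnMax part ['-'] 1 with
            | a0 :: b0 :: _ =>
              let a := PySem.Chars.strip a0
              let b := PySem.Chars.strip b0
              if a = [] ∨ b = [] then expanded
              else
                match PySem.Int.ofChars? a, PySem.Int.ofChars? b with
                | some sn, some en =>
                  let st : Int := if en ≥ sn then 1 else -1
                  (PySem.List.pyRange sn (en + st) st).foldl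
                    (fun exp n =>
                      exp ++ expandTokenA f (pre ++ padFmtA n (max a.length b.length : Int) ++ suf))
                    expanded
                | _, _ => expanded  -- ValueError: continue
            | _ => expanded  -- unreachable: split('-', 1) with '-' present yields two pieces
          else expanded ++ expandTokenA f (pre ++ part ++ suf)) []

def expand_slurm_hostlist_py (value : String) : List String :=
  let v := PySem.Chars.strip value.toList   -- (value or "").strip(): `value or ""` is `value` on str
  if v = [] then []
  else
    let results := (splitTopA v).foldl (fun acc tok => acc ++ expandTokenA (v.length + 1) tok) []
    (results.filter (fun r => decide (r ≠ []))).map (fun cs => String.ofList cs)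

-- ===== PORT B =====
-- _split_tokens: fold over enumerate(s) keeping only (parts, start, depth); pieces are slices
def splitStepB (s : List Char) (st : List (List Char) × Int × Int) (kc : Int × Char) :
    List (List Char) × Int × Int :=
  let parts := st.1
  let start := st.2.1
  let depth := st.2.2
  if kc.2 = '[' then (parts, start, depth + 1)
  else if kc.2 = ']' then (parts, start, max 0 (depth - 1))
  else if kc.2 = ',' ∧ depth = 0 then
    let piece := PySem.Chars.strip (PySem.List.slice s (some start) (some kc.1))
    ((if piece = [] then parts else parts ++ [piece]), kc.1 + 1, depth)
  else st

def splitTopB (v : List Char) : List (List Char) :=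
  let st := (PySem.List.enumerate v 0).foldl (splitStepB v) ([], 0, 0)
  let piece := PySem.Chars.strip (PySem.List.slice v (some st.2.1) none)
  if piece = [] then st.1 else st.1 ++ [piece]

-- DM helper lemmas for the worklist loop's termination measure (cited in decreasing_by)
theorem pvDM_cons_list (a : Nat) (R : List Nat) :
    Multiset.IsDershowitzMannaLT (↑R) (↑(a :: R) : Multiset Nat) := by
  refine ⟨↑R, 0, {a}, by simp, by simp, ?_, by simp⟩
  rw [add_comm (↑R : Multiset Nat), Multiset.singleton_add]; rfl

theorem pvDM_push_list (f : Nat) (L R : List Nat) (h : ∀ y ∈ L, y < f + 1) :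
    Multiset.IsDershowitzMannaLT (↑(L ++ R)) (↑((f + 1) :: R) : Multiset Nat) := by
  refine ⟨↑R, ↑L, {f + 1}, by simp, by rw [add_comm (↑R : Multiset Nat)]; rfl, ?_, ?_⟩
  · rw [add_comm (↑R : Multiset Nat), Multiset.singleton_add]; rfl
  · intro y hy
    exact ⟨f + 1, by simp, h y (by simpa using hy)⟩

-- the worklist: the head of the list is the top of B's stack (B pushes children
-- reversed and pops from the end, i.e. processes them in order).  Each entry
-- carries the same fuel guard as A's port; fuel is never exhausted in practice.
def loopB (stack : List (Nat × List Char)) (acc : List (List Char)) : List (List Char) :=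
  match stack with
  | [] => acc
  | (fl, t0) :: rest =>
    let token := PySem.Chars.strip t0
    if token = [] then loopB rest acc
    else
      let i := PySem.Chars.find token ['[']
      let j := if i ≥ 0 then PySem.Chars.findFrom token [']'] (i + 1) else -1
      if i < 0 ∨ j < 0 then loopB rest (acc ++ [token])
      else
        match fl with
        | 0 => loopB rest acc  -- fuel guard, unreachable
        | f + 1 =>
          let head := PySem.List.slice token none (some i)
          let body := PySem.List.slice token (some (i + 1)) (some j)
          let tail := PySem.List.slice token (some (j + 1)) none
          let fills := (PySem.Chars.splitOn body [',']).foldl (fun fs part0 =>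
            let part := PySem.Chars.strip part0
            if part = [] then fs
            else if PySem.Chars.isIn ['-'] part = false then fs ++ [part]
            else
              match PySem.Chars.splitOnMax part ['-'] 1 with
              | lo0 :: hi0 :: _ =>
                let lo := PySem.Chars.strip lo0
                let hi := PySem.Chars.strip hi0
                if lo = [] ∨ hi = [] then fs
                else
                  match PySem.Int.ofChars? lo, PySem.Int.ofChars? hi with
                  | some a, some b =>
                    let step : Int := if b ≥ a then 1 else -1
                    fs ++ (PySem.List.pyRange a (b + step) step).map
                      (fun n => PySem.Chars.zfill (PySem.Int.toStr n).toList (max lo.length hi.length : Int))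
                  | _, _ => fs  -- ValueError: continue
              | _ => fs  -- unreachable
            ) []
          let children := fills.map (fun fl' => head ++ fl' ++ tail)
          loopB (children.map (fun c => (f, c)) ++ rest) acc
termination_by (stack.map Prod.fst : Multiset Nat)
decreasing_by
  all_goals simp only [List.map_cons, List.map_append, List.map_map]
  all_goals first
    | exact pvDM_cons_list _ _
    | (apply pvDM_push_list
       intro y hy
       simp only [List.mem_map, Function.comp_apply] at hy
       obtain ⟨c, -, rfl⟩ := hy
       omega)

def expand_slurm_hostlist_py_alt (value : String) : List String :=
  let v := PySem.Chars.strip value.toList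
  if v = [] then []
  else
    (loopB ((splitTopB v).map (fun t => (v.length + 1, t))) []).map (fun cs => String.ofList cs)

-- ===== PRECONDITION & SPEC =====
def Spec_expand_slurm_hostlist_py (value : String) (out : List String) : Prop := out = expand_slurm_hostlist_py_alt value
instance (value : String) (out : List String) : Decidable (Spec_expand_slurm_hostlist_py value out) := by unfold Spec_expand_slurm_hostlist_py; infer_instance

-- ===== CLAIM (what is proved, stated in full; the proofs are below) =====
def Claim_equal_expand_slurm_hostlist_py : Prop := ∀ (value : String), Dom_expand_slurm_hostlist_py value → Spec_expand_slurm_hostlist_py value (expand_slurm_hostlist_py value)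

-- ===== LEMMAS AND PROOFS =====


-- one token's options and its one-step behaviour, shared shape for both ports
def pvOpts (part0 : List Char) : List (List Char) :=
  let part := PySem.Chars.strip part0
  if part = [] then []
  else if PySem.Chars.isIn ['-'] part = false then [part]
  else
    match PySem.Chars.splitOnMax part ['-'] 1 with
    | lo0 :: hi0 :: _ =>
      let lo := PySem.Chars.strip lo0
      let hi := PySem.Chars.strip hi0
      if lo = [] ∨ hi = [] then []
      else
        match PySem.Int.ofChars? lo, PySem.Int.ofChars? hi with
        | some a, some b =>
          let step : Int := if b ≥ a then 1 else -1
          (PySem.List.pyRange a (b + step) step).map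
            (fun n => PySem.Chars.zfill (PySem.Int.toStr n).toList (max lo.length hi.length : Int))
        | _, _ => []
    | _ => []

inductive PvStep where
  | skip : PvStep
  | emit : List Char → PvStep
  | expand : List (List Char) → PvStep

def pvStepOf (t0 : List Char) : PvStep :=
  let token := PySem.Chars.strip t0
  if token = [] then .skip
  else
    let i := PySem.Chars.find token ['[']
    let j := if i ≥ 0 then PySem.Chars.findFrom token [']'] (i + 1) else -1
    if i < 0 ∨ j < 0 then .emit token
    else
      let pre := PySem.List.slice token none (some i)
      let inside := PySem.List.slice token (some (i + 1)) (some j)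
      let suf := PySem.List.slice token (some (j + 1)) none
      .expand (((PySem.Chars.splitOn inside [',']).flatMap pvOpts).map (fun fl => pre ++ fl ++ suf))

-- find/findFrom bracket facts
theorem pvFind_toNat_lt (token : List Char) (c : Char)
    (h : 0 ≤ PySem.Chars.find token [c]) : (PySem.Chars.find token [c]).toNat < token.length := by
  have hs := (PySem.Chars.find_spec h).1
  by_contra hge
  rw [List.drop_eq_nil_iff.mpr (by omega)] at hs
  simpa using hs.length_le

theorem pvFindFrom_ge_neg_one (token : List Char) (i : Int) (h0 : 0 ≤ i)
    (hi : i.toNat < token.length) : -1 ≤ PySem.Chars.findFrom token [']'] (i + 1) := by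
  have hcast : i + 1 = ((i.toNat + 1 : Nat) : Int) := by omega
  have hk : i.toNat + 1 ≤ token.length := by omega
  rw [hcast, PySem.Chars.findFrom_natCast token [']'] (i.toNat + 1) hk]
  split
  · omega
  · have := PySem.Chars.neg_one_le_find (token.drop (i.toNat + 1)) [']']
    omega

-- A's per-part loop body rewritten through pvOpts
theorem pvA_part (f' : Nat) (pre suf : List Char) (exp : List (List Char)) (part0 : List Char) :
    (fun expanded part0 =>
          let part := PySem.Chars.strip part0
          if part = [] then expanded
          else if PySem.Chars.isIn ['-'] part then
            match PySem.Chars.splitOnMax part ['-'] 1 with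
            | a0 :: b0 :: _ =>
              let a := PySem.Chars.strip a0
              let b := PySem.Chars.strip b0
              if a = [] ∨ b = [] then expanded
              else
                match PySem.Int.ofChars? a, PySem.Int.ofChars? b with
                | some sn, some en =>
                  let st : Int := if en ≥ sn then 1 else -1
                  (PySem.List.pyRange sn (en + st) st).foldl
                    (fun exp n =>
                      exp ++ expandTokenA f' (pre ++ padFmtA n (max a.length b.length : Int) ++ suf))
                    expanded
                | _, _ => expanded
            | _ => expanded
          else expanded ++ expandTokenA f' (pre ++ part ++ suf)) exp part0
      = exp ++ (pvOpts part0).flatMap (fun fl => expandTokenA f' (pre ++ fl ++ suf)) := by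
  simp only [pvOpts]
  by_cases h1 : PySem.Chars.strip part0 = []
  · simp [h1]
  · cases hin : PySem.Chars.isIn ['-'] (PySem.Chars.strip part0)
    · simp [h1]
    · simp only [h1, Bool.true_eq_false, if_false]
      cases hsp : PySem.Chars.splitOnMax (PySem.Chars.strip part0) ['-'] 1 with
      | nil => simp
      | cons lo0 t =>
        cases t with
        | nil => simp
        | cons hi0 t2 =>
          by_cases h2 : PySem.Chars.strip lo0 = [] ∨ PySem.Chars.strip hi0 = []
          · simp [h2]
          · simp only [h2, if_false]
            cases PySem.Int.ofChars? (PySem.Chars.strip lo0) <;>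
              cases PySem.Int.ofChars? (PySem.Chars.strip hi0) <;> simp
            simp [List.flatMap, padFmtA, Function.comp_def]

-- B's per-part fills body rewritten through pvOpts
theorem pvB_fill (fs : List (List Char)) (part0 : List Char) :
    (fun fs part0 =>
            let part := PySem.Chars.strip part0
            if part = [] then fs
            else if PySem.Chars.isIn ['-'] part = false then fs ++ [part]
            else
              match PySem.Chars.splitOnMax part ['-'] 1 with
              | lo0 :: hi0 :: _ =>
                let lo := PySem.Chars.strip lo0
                let hi := PySem.Chars.strip hi0
                if lo = [] ∨ hi = [] then fs
                else
                  match PySem.Int.ofChars? lo, PySem.Int.ofChars? hi with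
                  | some a, some b =>
                    let step : Int := if b ≥ a then 1 else -1
                    fs ++ (PySem.List.pyRange a (b + step) step).map
                      (fun n => PySem.Chars.zfill (PySem.Int.toStr n).toList (max lo.length hi.length : Int))
                  | _, _ => fs
              | _ => fs) fs part0
      = fs ++ pvOpts part0 := by
  simp only [pvOpts]
  by_cases h1 : PySem.Chars.strip part0 = []
  · simp [h1]
  · cases hin : PySem.Chars.isIn ['-'] (PySem.Chars.strip part0)
    · simp [h1]
    · simp only [h1, Bool.true_eq_false, if_false]
      cases hsp : PySem.Chars.splitOnMax (PySem.Chars.strip part0) ['-'] 1 with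
      | nil => simp
      | cons lo0 t =>
        cases t with
        | nil => simp
        | cons hi0 t2 =>
          by_cases h2 : PySem.Chars.strip lo0 = [] ∨ PySem.Chars.strip hi0 = []
          · simp [h2]
          · simp only [h2, if_false]
            cases PySem.Int.ofChars? (PySem.Chars.strip lo0) <;>
              cases PySem.Int.ofChars? (PySem.Chars.strip hi0) <;> simp

-- folding a body of shape `acc ++ g x` is flatMap
theorem pvFoldl_flatMap {α β : Type} (F : List β → α → List β) (g : α → List β)
    (h : ∀ acc x, F acc x = acc ++ g x) (l : List α) (init : List β) :
    l.foldl F init = init ++ l.flatMap g := by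
  have : F = fun acc x => acc ++ g x := funext fun a => funext fun x => h a x
  rw [this, PySem.List.foldl_append_eq_flatMap]

-- one-step characterisation of A's expand_token
theorem pvExpA_step (f : Nat) (t0 : List Char) :
    expandTokenA f t0 = match pvStepOf t0 with
      | .skip => []
      | .emit tok => [tok]
      | .expand cs => match f with | 0 => [] | f' + 1 => cs.flatMap (expandTokenA f') := by
  unfold pvStepOf
  by_cases h0 : PySem.Chars.strip t0 = []
  · cases f <;> simp [expandTokenA, h0]
  · by_cases hin : (['['] : List Char) <:+: PySem.Chars.strip t0
    · have hi0 : 0 ≤ PySem.Chars.find (PySem.Chars.strip t0) ['['] :=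
        (PySem.Chars.find_nonneg_iff _ _).mpr hin
      have hisin : PySem.Chars.isIn ['['] (PySem.Chars.strip t0) = true :=
        (PySem.Chars.isIn_iff_infix _ _).mpr hin
      have hlt := pvFind_toNat_lt _ '[' hi0
      have hjge := pvFindFrom_ge_neg_one _ _ hi0 hlt
      by_cases he : PySem.Chars.findFrom (PySem.Chars.strip t0) [']']
          (PySem.Chars.find (PySem.Chars.strip t0) ['['] + 1) = -1
      · cases f <;> simp [expandTokenA, h0, hisin, hi0, he]
      · have hj0 : ¬ (PySem.Chars.find (PySem.Chars.strip t0) ['['] < 0 ∨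
            PySem.Chars.findFrom (PySem.Chars.strip t0) [']']
              (PySem.Chars.find (PySem.Chars.strip t0) ['['] + 1) < 0) := by omega
        cases f with
        | zero => simp [expandTokenA, h0, hisin, hi0, he, hj0]
        | succ f' =>
          simp only [expandTokenA, h0, hisin, Bool.true_eq_false, if_false, hi0,
            ge_iff_le, if_neg he]
          rw [pvFoldl_flatMap _ _ (pvA_part f' _ _) _ _]
          simp [hj0, List.flatMap_map, List.flatMap_assoc]
    · have hieq : PySem.Chars.find (PySem.Chars.strip t0) ['['] = -1 :=
        (PySem.Chars.find_eq_neg_one_iff _ _).mpr hin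
      have hisin : PySem.Chars.isIn ['['] (PySem.Chars.strip t0) = false :=
        (PySem.Chars.isIn_eq_false_iff _ _).mpr hin
      cases f <;> simp [expandTokenA, h0, hisin, hieq]

-- one-step characterisation of B's worklist body
theorem pvLoopB_step (f : Nat) (t0 : List Char) (rest : List (Nat × List Char)) (acc : List (List Char)) :
    loopB ((f, t0) :: rest) acc = match pvStepOf t0 with
      | .skip => loopB rest acc
      | .emit tok => loopB rest (acc ++ [tok])
      | .expand cs => match f with
        | 0 => loopB rest acc
        | f' + 1 => loopB (cs.map (fun c => (f', c)) ++ rest) acc := by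
  unfold pvStepOf
  rw [loopB]
  by_cases h0 : PySem.Chars.strip t0 = []
  · simp [h0]
  · by_cases hin : (['['] : List Char) <:+: PySem.Chars.strip t0
    · have hi0 : 0 ≤ PySem.Chars.find (PySem.Chars.strip t0) ['['] :=
        (PySem.Chars.find_nonneg_iff _ _).mpr hin
      have hlt := pvFind_toNat_lt _ '[' hi0
      have hjge := pvFindFrom_ge_neg_one _ _ hi0 hlt
      by_cases he : PySem.Chars.findFrom (PySem.Chars.strip t0) [']']
          (PySem.Chars.find (PySem.Chars.strip t0) ['['] + 1) = -1
      · simp [h0, hi0, he]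
      · have hj0 : ¬ (PySem.Chars.find (PySem.Chars.strip t0) ['['] < 0 ∨
            (if PySem.Chars.find (PySem.Chars.strip t0) ['['] ≥ 0 then
              PySem.Chars.findFrom (PySem.Chars.strip t0) [']']
                (PySem.Chars.find (PySem.Chars.strip t0) ['['] + 1) else -1) < 0) := by
          rw [if_pos hi0]; omega
        cases f with
        | zero => simp only [h0 ]; simp [hj0]
        | succ f' =>
          simp only [h0, if_neg hj0]
          rw [pvFoldl_flatMap _ _ pvB_fill _ _]
          simp [List.map_map, Function.comp_def]
    · have hieq : PySem.Chars.find (PySem.Chars.strip t0) ['['] = -1 :=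
        (PySem.Chars.find_eq_neg_one_iff _ _).mpr hin
      simp [h0, hieq]

-- the worklist computes exactly the recursion's flatten
theorem pvLoopB_eq (f : Nat) : ∀ (t0 : List Char) (rest : List (Nat × List Char)) (acc : List (List Char)),
    loopB ((f, t0) :: rest) acc = loopB rest (acc ++ expandTokenA f t0) := by
  induction f with
  | zero =>
    intro t0 rest acc
    rw [pvLoopB_step, pvExpA_step]
    cases h : pvStepOf t0 <;> simp
  | succ f' ih =>
    intro t0 rest acc
    have haux : ∀ (cs : List (List Char)) (acc : List (List Char)),
        loopB (cs.map (fun c => (f', c)) ++ rest) acc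
          = loopB rest (acc ++ cs.flatMap (expandTokenA f')) := by
      intro cs
      induction cs with
      | nil => intro acc; simp
      | cons c cs' ihc =>
        intro acc
        simp only [List.map_cons, List.cons_append, List.flatMap_cons]
        rw [ih, ihc, List.append_assoc]
    rw [pvLoopB_step, pvExpA_step]
    cases h : pvStepOf t0 with
    | skip => simp
    | emit tok => rfl
    | expand cs => exact haux cs acc

theorem pvLoopB_all (F : Nat) (toks : List (List Char)) (acc : List (List Char)) :
    loopB (toks.map (fun t => (F, t))) acc = acc ++ toks.flatMap (expandTokenA F) := by
  induction toks generalizing acc with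
  | nil => simp [loopB]
  | cons t ts ih => rw [List.map_cons, pvLoopB_eq, List.flatMap_cons, ih, List.append_assoc]

-- a token is only emitted when nonempty
theorem pvStepOf_emit_ne (t0 tok : List Char) (h : pvStepOf t0 = .emit tok) : tok ≠ [] := by
  unfold pvStepOf at h
  by_cases h0 : PySem.Chars.strip t0 = []
  · simp [h0] at h
  · simp only [h0] at h  -- lint: h0 also closes the dite
    by_cases hc : (PySem.Chars.find (PySem.Chars.strip t0) ['['] < 0 ∨
        (if 0 ≤ PySem.Chars.find (PySem.Chars.strip t0) ['['] then
          PySem.Chars.findFrom (PySem.Chars.strip t0) [']']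
            (PySem.Chars.find (PySem.Chars.strip t0) ['['] + 1) else -1) < 0)
    · rw [if_pos hc] at h
      injection h with h1
      rw [← h1]
      exact h0
    · rw [if_neg hc] at h
      simp at h

-- every hostname A emits is nonempty
theorem pvExpA_ne_nil (f : Nat) : ∀ (t0 : List Char) (r : List Char), r ∈ expandTokenA f t0 → r ≠ [] := by
  induction f with
  | zero =>
    intro t0 r hr
    rw [pvExpA_step] at hr
    cases hst : pvStepOf t0 <;> rw [hst] at hr
    · simp at hr
    · simp at hr; subst hr; exact pvStepOf_emit_ne _ _ hst
    · simp at hr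
  | succ f' ih =>
    intro t0 r hr
    rw [pvExpA_step] at hr
    cases hst : pvStepOf t0 <;> rw [hst] at hr
    · simp at hr
    · simp at hr; subst hr; exact pvStepOf_emit_ne _ _ hst
    · simp only [List.mem_flatMap] at hr
      obtain ⟨c, -, hrc⟩ := hr
      exact ih c r hrc

-- the split loops: B's (parts, start, depth) over enumerate simulates A's (parts, buf, depth)
theorem pvSplit_loop : ∀ (rest pre : List Char) (parts : List (List Char)) (depth : Int)
    (startN : Nat), startN ≤ pre.length →
    ∃ endN : Nat, endN ≤ (pre ++ rest).length ∧
      (PySem.List.enumerate rest (pre.length : Int)).foldl (splitStepB (pre ++ rest))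
          (parts, (startN : Int), depth)
        = ((rest.foldl splitStepA (parts, pre.drop startN, depth)).1, (endN : Int),
           (rest.foldl splitStepA (parts, pre.drop startN, depth)).2.2)
      ∧ (pre ++ rest).drop endN = (rest.foldl splitStepA (parts, pre.drop startN, depth)).2.1 := by
  intro rest
  induction rest with
  | nil =>
    intro pre parts depth startN hs
    exact ⟨startN, by simpa using hs, by simp [PySem.List.enumerate], by simp⟩
  | cons ch rest' ih =>
    intro pre parts depth startN hs
    rw [PySem.List.enumerate_cons, List.foldl_cons, List.foldl_cons]
    have hv : pre ++ ch :: rest' = (pre ++ [ch]) ++ rest' := by simp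
    have hlen : (pre.length : Int) + 1 = (((pre ++ [ch]).length : Nat) : Int) := by
      simp
    have hbuf : (pre ++ [ch]).drop startN = pre.drop startN ++ [ch] :=
      List.drop_append_of_le_length hs
    by_cases hb1 : ch = '['
    · subst hb1
      have hstepB : splitStepB (pre ++ '[' :: rest') (parts, (startN : Int), depth)
          ((pre.length : Int), '[') = (parts, (startN : Int), depth + 1) := by
        simp [splitStepB]
      have hstepA : splitStepA (parts, pre.drop startN, depth) '['
          = (parts, pre.drop startN ++ ['['], depth + 1) := by
        simp [splitStepA]
      rw [hstepB, hstepA, hv, hlen, ← hbuf]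
      obtain ⟨endN, e1, e2, e3⟩ := ih (pre ++ ['[']) parts (depth + 1) startN (by simp; omega)
      exact ⟨endN, by simpa using e1, e2, e3⟩
    · by_cases hb2 : ch = ']'
      · subst hb2
        have hstepB : splitStepB (pre ++ ']' :: rest') (parts, (startN : Int), depth)
            ((pre.length : Int), ']') = (parts, (startN : Int), max 0 (depth - 1)) := by
          simp [splitStepB]
        have hstepA : splitStepA (parts, pre.drop startN, depth) ']'
            = (parts, pre.drop startN ++ [']'], max 0 (depth - 1)) := by
          simp [splitStepA]
        rw [hstepB, hstepA, hv, hlen, ← hbuf]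
        obtain ⟨endN, e1, e2, e3⟩ := ih (pre ++ [']']) parts (max 0 (depth - 1)) startN (by simp; omega)
        exact ⟨endN, by simpa using e1, e2, e3⟩
      · by_cases hb3 : ch = ',' ∧ depth = 0
        · obtain ⟨hch, hd⟩ := hb3
          subst hch; subst hd
          have hslice : PySem.List.slice (pre ++ ',' :: rest') (some (startN : Int))
              (some (pre.length : Int)) = pre.drop startN := by
            rw [PySem.List.slice_natCast]
            rw [List.drop_append_of_le_length hs]
            exact List.take_left' (by simp)
          have hstepB : splitStepB (pre ++ ',' :: rest') (parts, (startN : Int), (0 : Int))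
              ((pre.length : Int), ',')
              = ((if PySem.Chars.strip (pre.drop startN) = [] then parts
                  else parts ++ [PySem.Chars.strip (pre.drop startN)]), (pre.length : Int) + 1, (0 : Int)) := by
            simp [splitStepB, hslice]
          have hstepA : splitStepA (parts, pre.drop startN, (0 : Int)) ','
              = ((if PySem.Chars.strip (pre.drop startN) = [] then parts
                  else parts ++ [PySem.Chars.strip (pre.drop startN)]), ([] : List Char), (0 : Int)) := by
            simp [splitStepA]
          rw [hstepB, hstepA, hv, hlen]
          obtain ⟨endN, e1, e2, e3⟩ := ih (pre ++ [','])
            (if PySem.Chars.strip (pre.drop startN) = [] then parts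
              else parts ++ [PySem.Chars.strip (pre.drop startN)]) 0 ((pre ++ [',']).length) le_rfl
          rw [List.drop_length] at e2 e3
          exact ⟨endN, by simpa using e1, e2, e3⟩
        · have hstepB : splitStepB (pre ++ ch :: rest') (parts, (startN : Int), depth)
              ((pre.length : Int), ch) = (parts, (startN : Int), depth) := by
            simp [splitStepB, hb1, hb2]
            intro hc
            rcases not_and_or.mp hb3 with h | h
            · exact absurd hc h
            · intro hd; exact absurd hd h
          have hstepA : splitStepA (parts, pre.drop startN, depth) ch
              = (parts, pre.drop startN ++ [ch], depth) := by
            simp [splitStepA, hb1, hb2]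
            intro hc
            rcases not_and_or.mp hb3 with h | h
            · exact absurd hc h
            · intro hd; exact absurd hd h
          rw [hstepB, hstepA, hv, hlen, ← hbuf]
          obtain ⟨endN, e1, e2, e3⟩ := ih (pre ++ [ch]) parts depth startN (by simp; omega)
          exact ⟨endN, by simpa using e1, e2, e3⟩

-- the two top-level splitters agree
theorem pvSplit_eq (v : List Char) : splitTopB v = splitTopA v := by
  obtain ⟨endN, -, e2, e3⟩ := pvSplit_loop v [] [] 0 0 (by simp)
  simp only [List.nil_append, List.length_nil, Nat.cast_zero, List.drop_zero] at e2 e3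
  unfold splitTopB splitTopA
  simp only [e2, PySem.List.slice_from_natCast, e3]

-- ===== VERDICT (by name: the statement is the Claim_ definition above) =====
theorem expand_slurm_hostlist_py_spec : Claim_equal_expand_slurm_hostlist_py := by
  intro value _
  unfold Spec_expand_slurm_hostlist_py expand_slurm_hostlist_py expand_slurm_hostlist_py_alt
  simp only []
  by_cases hv : PySem.Chars.strip value.toList = []
  · simp [hv]
  · simp only [if_neg hv]
    rw [pvSplit_eq, pvLoopB_all,
      PySem.List.foldl_append_eq_flatMap (expandTokenA ((PySem.Chars.strip value.toList).length + 1))]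
    simp only [List.nil_append]
    refine congrArg (List.map (fun cs => String.ofList cs)) ?_
    rw [List.filter_eq_self.mpr]
    intro r hr
    rw [List.mem_flatMap] at hr
    obtain ⟨tok, -, hrt⟩ := hr
    simpa using pvExpA_ne_nil _ tok r hrt
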